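-- pv_equiv track=rewrite | github.com/raeez/chiral-bar-cobar | compute/lib/factorization_coproduct_engine.py | all_set_partitions_into_two
-- ===== SOURCE A (Python) =====
-- from itertools import combinations, permutations
-- from typing import Dict, List, Optional, Tuple, Any, Set, FrozenSet
--
-- def all_set_partitions_into_two(n: int) -> List[Tuple[FrozenSet[int], FrozenSet[int]]]:
--     """All unordered bipartitions {I, J} of [0, n-1] with I sqcup J = [0, n-1].
--
--     These index the summands of the UNORDERED (factorization) coproduct.
--     Returns list of (I, J) pairs where I and J are frozensets.
--     Includes the empty partitions (I = emptyset, J = everything) and vice versa.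
--     """
--     S = frozenset(range(n))
--     result = []
--     # To avoid double-counting unordered pairs, we require min element
--     # is in I (or I is empty).  But for coproduct purposes we want
--     # ORDERED pairs (I, J) -- both orderings matter for the tensor product.
--     for k in range(n + 1):
--         for I_tuple in combinations(range(n), k):
--             I = frozenset(I_tuple)
--             J = S - I
--             result.append((I, J))
--     return result
-- ===== SOURCE B (Python) =====
-- def all_set_partitions_into_two(n):
--     """All ordered bipartitions (I, J) of [0, n-1], via bitmask enumeration.
--
--     Each subset I of range(n) is the set of set bits of a mask in
--     [0, 2**n); J is its complement.  The build-then-sort pass recovers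
--     the cardinality-ascending, lexicographic-within-size output order.
--     """
--     if n < 0:
--         return []  # no admissible subset sizes k in 0..n
--     universe = range(n)
--     pairs = []
--     for mask in range(2 ** n):
--         I = frozenset(i for i in universe if (mask >> i) & 1)
--         J = frozenset(i for i in universe if not ((mask >> i) & 1))
--         pairs.append((I, J))
--     pairs.sort(key=lambda p: (len(p[0]), tuple(sorted(p[0]))))
--     return pairs
-- ===== Notes on version B (the rewrite author's own statement) =====
-- stated objective: alternative
-- what changed: Replaces the nested itertools.combinations enumeration with a bitmask sweep over range(2**n) that decodes each mask's set bits into (I, J), followed by one sort on the key (len(I), sorted(I)) that restores the size-then-lexicographic order.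
import Mathlib
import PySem

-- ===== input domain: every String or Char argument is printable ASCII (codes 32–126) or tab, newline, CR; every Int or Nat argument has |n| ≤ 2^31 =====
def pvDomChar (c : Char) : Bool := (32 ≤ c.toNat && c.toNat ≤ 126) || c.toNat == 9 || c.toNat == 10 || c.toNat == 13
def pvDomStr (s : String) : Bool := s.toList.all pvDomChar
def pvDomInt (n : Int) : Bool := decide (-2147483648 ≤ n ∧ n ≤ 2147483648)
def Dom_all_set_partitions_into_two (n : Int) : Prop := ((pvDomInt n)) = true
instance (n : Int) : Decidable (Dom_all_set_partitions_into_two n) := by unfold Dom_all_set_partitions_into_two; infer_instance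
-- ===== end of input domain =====

-- B replaces the nested combinations enumeration by a bitmask sweep plus one sort; equal cost, different algorithm.

-- ===== PORT A =====
-- Python frozensets are ported as PySem.Set (distinct-element lists, compared as finite sets).
-- The loop variable k of range(n+1) is a nonnegative Int; combinations takes its value as a Nat (k.toNat, exact here).
def all_set_partitions_into_two (n : Int) : List (List Int × List Int) :=
  let S : PySem.Set Int := PySem.Set.ofList (PySem.List.pyRange 0 n)
  (PySem.List.pyRange 0 (n + 1)).foldl (fun result k =>
    (PySem.List.combinations (PySem.List.pyRange 0 n) k.toNat).foldl
      (fun result I_tuple =>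
        let I : PySem.Set Int := PySem.Set.ofList I_tuple
        let J : PySem.Set Int := PySem.Set.diff S I
        result ++ [(I, J)])
      result) []

-- ===== PORT B =====
-- '2 ** n' and the bit test '(mask >> i) & 1' are ported through .toNat: past the n < 0 guard
-- every mask and i is nonnegative, so this is exact.  list.sort(key=(k1, k2)) is PySem.List.sorted2.
def all_set_partitions_into_two_alt (n : Int) : List (List Int × List Int) :=
  if n < 0 then []
  else
  let univ := PySem.List.pyRange 0 n
  let pairs := (PySem.List.pyRange 0 (2 ^ n.toNat : Int)).foldl
    (fun pairs mask =>
      let I : PySem.Set Int := PySem.Set.ofList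
        (univ.filter (fun i => (mask.toNat >>> i.toNat) &&& 1 == 1))
      let J : PySem.Set Int := PySem.Set.ofList
        (univ.filter (fun i => !((mask.toNat >>> i.toNat) &&& 1 == 1)))
      pairs ++ [(I, J)]) []
  PySem.List.sorted2 pairs (fun p => PySem.List.len p.1) (fun p => PySem.List.sorted p.1 (fun x => x))

-- ===== PRECONDITION & SPEC =====
def Spec_all_set_partitions_into_two (n : Int) (out : List (List Int × List Int)) : Prop := out = all_set_partitions_into_two_alt n
instance (n : Int) (out : List (List Int × List Int)) : Decidable (Spec_all_set_partitions_into_two n out) := by unfold Spec_all_set_partitions_into_two; infer_instance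

-- ===== CLAIM (what is proved, stated in full; the proofs are below) =====
def Claim_equal_all_set_partitions_into_two : Prop := ∀ (n : Int), Dom_all_set_partitions_into_two n → Spec_all_set_partitions_into_two n (all_set_partitions_into_two n)

-- ===== LEMMAS AND PROOFS =====

-- range(0, n) is (List.range n.toNat) cast to Int
theorem pvRangeZero (n : Int) :
    PySem.List.pyRange 0 n = (List.range n.toNat).map (fun k : Nat => (k : Int)) := by
  simp only [PySem.List.pyRange]
  norm_num
  by_cases h : (0:Int) < n
  · simp [h]
  · have h0 : n.toNat = 0 := by omega
    simp [h, h0]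

-- the universe [0, n-1] as an Int list, and the decoded subset of a mask
def pvUniv (m : Nat) : List Int := (List.range m).map (fun k : Nat => (k : Int))
def pvDec (m : Nat) (mask : Nat) : List Int :=
  (pvUniv m).filter (fun i => (mask >>> i.toNat) &&& 1 == 1)
def pvSubsetsA (m : Nat) : List (List Int) :=
  (List.range (m + 1)).flatMap (fun k => PySem.List.combinations (pvUniv m) k)
def pvLT' (c d : List Int) : Prop := c.length < d.length ∨ (c.length = d.length ∧ c < d)

theorem pvUniv_pairwise (m : Nat) : (pvUniv m).Pairwise (· < ·) := by
  refine List.Pairwise.map _ ?_ (List.pairwise_lt_range)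
  intro a b h; exact_mod_cast h

theorem pvCombosLen {α : Type} (xs : List α) (r : Nat) :
    (PySem.List.combinations xs r).length = Nat.choose xs.length r := by
  induction xs generalizing r with
  | nil => cases r <;> simp [PySem.List.combinations_zero, PySem.List.combinations_nil_succ]
  | cons x xs ih =>
    cases r with
    | zero => simp [PySem.List.combinations_zero]
    | succ r =>
      simp [PySem.List.combinations_cons_succ, ih, Nat.choose_succ_succ]

theorem pvCombosLex (xs : List Int) (h : xs.Pairwise (· < ·)) (r : Nat) :
    (PySem.List.combinations xs r).Pairwise (· < ·) := by
  induction xs generalizing r with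
  | nil =>
    cases r <;> simp [PySem.List.combinations_zero, PySem.List.combinations_nil_succ]
  | cons x xs ih =>
    rcases List.pairwise_cons.mp h with ⟨hx, hxs⟩
    cases r with
    | zero => simp [PySem.List.combinations_zero]
    | succ r =>
      rw [PySem.List.combinations_cons_succ, List.pairwise_append]
      refine ⟨?_, ih hxs (r+1), ?_⟩
      · refine List.Pairwise.map _ ?_ (ih hxs r)
        intro a b hab
        exact List.Lex.cons hab
      · intro a ha b hb
        rcases List.mem_map.mp ha with ⟨a', ha', rfl⟩
        rcases (PySem.List.mem_combinations_iff _ _ _).mp hb with ⟨hsub, hlen⟩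
        cases b with
        | nil => simp at hlen
        | cons y b' =>
          have hy : y ∈ xs := hsub.subset (List.mem_cons_self)
          exact List.Lex.rel (hx y hy)

theorem pvSubsetsA_pairwise (m : Nat) : (pvSubsetsA m).Pairwise pvLT' := by
  unfold pvSubsetsA
  generalize m + 1 = K
  induction K with
  | zero => simp
  | succ K ih =>
    rw [List.range_succ, List.flatMap_append, List.pairwise_append]
    refine ⟨ih, ?_, ?_⟩
    · simp only [List.flatMap_cons, List.flatMap_nil, List.append_nil]
      refine List.Pairwise.imp_of_mem ?_ (pvCombosLex _ (pvUniv_pairwise m) K)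
      intro a b ha hb hab
      have hla := ((PySem.List.mem_combinations_iff _ _ _).mp ha).2
      have hlb := ((PySem.List.mem_combinations_iff _ _ _).mp hb).2
      exact Or.inr ⟨by rw [hla, hlb], hab⟩
    · intro a ha b hb
      rcases List.mem_flatMap.mp ha with ⟨k, hk, hak⟩
      simp only [List.flatMap_cons, List.flatMap_nil, List.append_nil] at hb
      have hla := ((PySem.List.mem_combinations_iff _ _ _).mp hak).2
      have hlb := ((PySem.List.mem_combinations_iff _ _ _).mp hb).2
      exact Or.inl (by rw [hla, hlb]; exact List.mem_range.mp hk)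

theorem pvSubsetsA_length (m : Nat) : (pvSubsetsA m).length = 2 ^ m := by
  unfold pvSubsetsA
  rw [List.length_flatMap]
  have h : ∀ k, (PySem.List.combinations (pvUniv m) k).length = Nat.choose m k := by
    intro k; rw [pvCombosLen]; simp [pvUniv]
  simp only [h]
  rw [← Nat.sum_range_choose m]
  exact Nat.add_zero _

theorem pvMemDec (m mask i : Nat) :
    ((i : Int) ∈ pvDec m mask) ↔ (i < m ∧ mask.testBit i = true) := by
  simp [pvDec, pvUniv, List.mem_filter, Nat.testBit]

theorem pvDecPerm (m : Nat) :
    ((List.range (2 ^ m)).map (pvDec m)).Perm (pvSubsetsA m) := by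
  have hsub : (List.range (2 ^ m)).map (pvDec m) ⊆ pvSubsetsA m := by
    intro c hc
    rcases List.mem_map.mp hc with ⟨mask, _, rfl⟩
    have hs : (pvDec m mask).Sublist (pvUniv m) := List.filter_sublist
    have hl : (pvDec m mask).length ≤ m := by
      simpa [pvUniv] using hs.length_le
    refine List.mem_flatMap.mpr ⟨(pvDec m mask).length, List.mem_range.mpr (by omega), ?_⟩
    exact (PySem.List.mem_combinations_iff _ _ _).mpr ⟨hs, rfl⟩
  have hnd : ((List.range (2 ^ m)).map (pvDec m)).Nodup := by
    refine (List.nodup_range).map_on ?_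
    intro a ha b hb hab
    have ha' := List.mem_range.mp ha
    have hb' := List.mem_range.mp hb
    refine Nat.eq_of_testBit_eq ?_
    intro i
    by_cases him : i < m
    · have := (pvMemDec m a i).symm.trans (hab ▸ pvMemDec m b i)
      rcases Bool.eq_false_or_eq_true (a.testBit i) with h1 | h1 <;>
        rcases Bool.eq_false_or_eq_true (b.testBit i) with h2 | h2 <;>
        simp_all
    · have h2i : 2 ^ m ≤ 2 ^ i := Nat.pow_le_pow_right (by omega) (by omega)
      rw [Nat.testBit_lt_two_pow (by omega), Nat.testBit_lt_two_pow (by omega)]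
  have hlen : (pvSubsetsA m).length ≤ ((List.range (2 ^ m)).map (pvDec m)).length := by
    simp [pvSubsetsA_length]
  exact (List.subperm_of_subset hnd hsub).perm_of_length_le hlen

theorem pvSorted2Eq {α κ₁ κ₂ : Type} [LinearOrder κ₁] [LinearOrder κ₂]
    (xs ys : List α) (k1 : α → κ₁) (k2 : α → κ₂) (hp : ys.Perm xs)
    (hpw : ys.Pairwise (fun a b => k1 a < k1 b ∨ (k1 a = k1 b ∧ k2 a < k2 b))) :
    PySem.List.sorted2 xs k1 k2 = ys := by
  have hkey : PySem.List.sorted2 xs k1 k2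
      = PySem.List.sorted xs (fun x => (toLex (k1 x, k2 x) : κ₁ ×ₗ κ₂)) := by
    simp only [PySem.List.sorted2, PySem.List.sorted]
    congr 1
    funext acc x
    congr 1
    funext a b
    rcases lt_trichotomy (k1 a) (k1 b) with h | h | h <;>
      simp [Prod.Lex.lt_iff, h, lt_asymm]
  rw [hkey]
  refine PySem.List.sorted_eq_of_perm_of_pairwise_lt _ _ _ hp ?_
  refine hpw.imp ?_
  intro a b hab
  rw [Prod.Lex.lt_iff]
  exact hab

def pvG (m : Nat) (I : List Int) : List Int × List Int :=
  (I, (pvUniv m).filter (fun x => !(List.contains I x)))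

theorem pvA_eq (m : Nat) :
    all_set_partitions_into_two (m : Int) = (pvSubsetsA m).map (pvG m) := by
  unfold all_set_partitions_into_two
  have h1 : ((m:Int)+1).toNat = m + 1 := by omega
  simp only [pvRangeZero, h1, Int.toNat_natCast]
  simp only [PySem.List.foldl_append_singleton_eq_map, PySem.List.foldl_append_eq_flatMap,
    List.nil_append, List.flatMap_map, Int.toNat_natCast]
  rw [← List.map_flatMap]
  refine List.map_congr_left ?_
  intro I hI
  rcases List.mem_flatMap.mp hI with ⟨k, -, hk⟩
  have hsub := ((PySem.List.mem_combinations_iff _ _ _).mp hk).1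
  have hUn : (List.map (fun k : Nat => ((k : Int))) (List.range m)).Nodup :=
    (pvUniv_pairwise m).nodup
  have hIn : I.Nodup := hsub.nodup hUn
  simp [pvG, PySem.Set.diff, PySem.Set.contains,
    PySem.Set.ofList_eq_self_of_nodup _ hIn,
    PySem.Set.ofList_eq_self_of_nodup _ hUn, pvUniv]

theorem pvNeg (n : Int) (h : n < 0) : all_set_partitions_into_two_alt n = [] := by
  unfold all_set_partitions_into_two_alt
  rw [if_pos h]

theorem pvMain (m : Nat) :
    all_set_partitions_into_two ((m : Nat) : Int) = all_set_partitions_into_two_alt ((m : Nat) : Int) := by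
  unfold all_set_partitions_into_two_alt
  rw [if_neg (by omega : ¬ ((m : Nat) : Int) < 0)]
  have h2 : ((2:Int) ^ m).toNat = 2 ^ m := by
    have h : ((2^m : Nat) : Int) = (2:Int)^m := by push_cast; ring
    rw [← h, Int.toNat_natCast]
  simp only [pvRangeZero, Int.toNat_natCast, h2,
    PySem.List.foldl_append_singleton_eq_map, List.nil_append, List.map_map]
  have hmap : ∀ mask : Nat,
      ((PySem.Set.ofList
          (List.filter (fun i : Int => ((mask:Int)).toNat >>> i.toNat &&& 1 == 1)
            (List.map (fun k : Nat => (k:Int)) (List.range m))) : PySem.Set Int),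
        (PySem.Set.ofList
          (List.filter (fun i : Int => !(((mask:Int)).toNat >>> i.toNat &&& 1 == 1))
            (List.map (fun k : Nat => (k:Int)) (List.range m))) : PySem.Set Int))
      = pvG m (pvDec m mask) := by
    intro mask
    have hUn : (List.map (fun k : Nat => ((k : Int))) (List.range m)).Nodup :=
      (pvUniv_pairwise m).nodup
    simp only [Int.toNat_natCast]
    rw [PySem.Set.ofList_eq_self_of_nodup _ (hUn.filter _),
        PySem.Set.ofList_eq_self_of_nodup _ (hUn.filter _)]
    unfold pvG
    refine Prod.ext rfl ?_
    show _ = List.filter (fun x => !(List.contains (pvDec m mask) x)) (pvUniv m)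
    refine (List.filter_congr ?_)
    intro x hx
    simp only [List.contains_eq_mem, pvDec, List.mem_filter, pvUniv]
    rcases Nat.mod_two_eq_zero_or_one (mask >>> x.toNat) with h|h <;>
      simp [hx, Nat.and_one_is_mod, h]
  simp only [Function.comp_def, hmap]
  rw [show (fun x => pvG m (pvDec m x)) = pvG m ∘ pvDec m from rfl,
     ← List.map_map, pvA_eq]
  have hp : (List.map (pvG m) (pvSubsetsA m)).Perm
      (List.map (pvG m) (List.map (pvDec m) (List.range (2 ^ m)))) :=
    ((pvDecPerm m).map (pvG m)).symm
  have hpw : (List.map (pvG m) (pvSubsetsA m)).Pairwise (fun a b =>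
      PySem.List.len a.1 < PySem.List.len b.1 ∨ (PySem.List.len a.1 = PySem.List.len b.1 ∧
        PySem.List.sorted a.1 (fun x => x) < PySem.List.sorted b.1 (fun x => x))) := by
    rw [List.pairwise_map]
    refine List.Pairwise.imp_of_mem ?_ (pvSubsetsA_pairwise m)
    intro a b ha hb hab
    have hpa : a.Pairwise (· < ·) := by
      rcases List.mem_flatMap.mp ha with ⟨k, -, hk⟩
      exact List.Pairwise.sublist (((PySem.List.mem_combinations_iff _ _ _).mp hk).1) (pvUniv_pairwise m)
    have hpb : b.Pairwise (· < ·) := by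
      rcases List.mem_flatMap.mp hb with ⟨k, -, hk⟩
      exact List.Pairwise.sublist (((PySem.List.mem_combinations_iff _ _ _).mp hk).1) (pvUniv_pairwise m)
    have hsa : PySem.List.sorted a (fun x => x) = a :=
      PySem.List.sorted_eq_self_of_pairwise _ _ (hpa.imp le_of_lt)
    have hsb : PySem.List.sorted b (fun x => x) = b :=
      PySem.List.sorted_eq_self_of_pairwise _ _ (hpb.imp le_of_lt)
    rcases hab with h | ⟨h1, h2⟩
    · exact Or.inl (by simp only [pvG, PySem.List.len]; exact_mod_cast h)
    · refine Or.inr ⟨by simp only [pvG, PySem.List.len, h1], ?_⟩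
      show PySem.List.sorted (pvG m a).1 (fun x => x) < PySem.List.sorted (pvG m b).1 (fun x => x)
      simpa only [pvG, hsa, hsb] using h2
  have hgen := pvSorted2Eq (κ₁ := Int) (κ₂ := List Int)
      (List.map (pvG m) (List.map (pvDec m) (List.range (2 ^ m))))
      (List.map (pvG m) (pvSubsetsA m))
      (fun p => PySem.List.len p.1) (fun p => PySem.List.sorted p.1 (fun x => x)) hp hpw
  refine Eq.symm (Eq.trans ?_ hgen)
  -- the port's sorted2 was elaborated with core LT/Decidable instances; they decide the same
  -- propositions as the LinearOrder-derived ones, so the two sorted2 terms are equal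
  simp only [PySem.List.sorted2]
  congr 1
  funext acc x
  congr 1
  funext a b
  refine congrArg₂ (· || ·) ?_ (congrArg₂ (· && ·) (congrArg (! ·) ?_) ?_) <;>
    exact decide_eq_decide.mpr Iff.rfl

-- ===== VERDICT (by name: the statement is the Claim_ definition above) =====
theorem all_set_partitions_into_two_spec : Claim_equal_all_set_partitions_into_two := by
  intro n _
  unfold Spec_all_set_partitions_into_two
  by_cases h : n < 0
  · rw [pvNeg n h]
    unfold all_set_partitions_into_two
    have h1 : (n + 1).toNat = 0 := by omega
    simp [pvRangeZero, h1]
  · have hn : ((n.toNat : Nat) : Int) = n := by omega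
    rw [← hn]
    exact pvMain n.toNat
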